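-- pv_equiv track=rewrite | github.com/mscibxablach/CleanPhoto | PlotBoundDetector.py | get_continous_chunks
-- ===== SOURCE A (Python) =====
-- def get_continous_chunks(array):
--     result = []
--     min_value = min(array)
--     i = 0
--     while i < len(array) - 1:
--         value = array[i]
--         if value > min_value:
--             chunk = [i]
--             counter = i + 1
--             for j in range(counter, len(array)):
--                 value = array[j]
--                 if value > min_value:
--                     chunk.append(j)
--                 else:
--                     i = j
--                     result.append(chunk)
--                     break
--             else:
--                 result.append(chunk)
--                 i = j
--                 continue
--         elif value <= min_value:
--             i += 1
--             continue
--     return result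
-- ===== SOURCE B (Python) =====
-- def get_continous_chunks(array):
--     min_value = min(array)
--     chunks = []
--     run = []
--     for i, value in enumerate(array):
--         if value > min_value:
--             run.append(i)
--         elif run:
--             chunks.append(run)
--             run = []
--     if run:
--         chunks.append(run)
--     return chunks
-- ===== Notes on version B (the rewrite author's own statement) =====
-- stated objective: simpler
-- what changed: Replaced A's while-loop with a nested for/else scan and index jumping by a single linear run-accumulator pass over enumerate(array) that collects every maximal run of indices whose value exceeds the minimum.
-- intended difference: On arrays whose last element exceeds the minimum while the second-to-last does not (a singleton run at the final index), A omits that run because its while-loop never starts a chunk at the last position, while B returns it; the run is a genuine above-minimum region, so including it is the intended value. — e.g. on get_continous_chunks([1, 0, 2]): A returns [[0]], B returns [[0], [2]]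
import Mathlib
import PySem

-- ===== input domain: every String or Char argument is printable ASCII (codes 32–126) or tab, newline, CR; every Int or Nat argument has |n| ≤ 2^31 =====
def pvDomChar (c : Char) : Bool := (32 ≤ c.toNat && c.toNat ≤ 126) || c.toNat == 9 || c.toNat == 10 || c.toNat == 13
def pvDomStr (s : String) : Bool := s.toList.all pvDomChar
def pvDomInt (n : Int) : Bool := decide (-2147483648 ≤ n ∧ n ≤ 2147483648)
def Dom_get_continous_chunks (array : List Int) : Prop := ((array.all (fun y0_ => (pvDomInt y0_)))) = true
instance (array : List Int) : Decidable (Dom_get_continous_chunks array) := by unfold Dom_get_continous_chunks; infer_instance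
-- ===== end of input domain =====

-- B replaces A's while-loop with nested for/else scan and index jumping by one linear
-- run-accumulator pass collecting every maximal run of above-minimum indices
-- (objective: simpler); B also returns a singleton run at the last index, which A
-- omits (the intended-difference region D_ below).

-- ===== PORT A =====
-- A's inner `for j in range(counter, len(array))` loop: appends j to chunk while
-- array[j] > min_value; on break returns (chunk, j); when the range is exhausted the
-- Python loop variable j is len(array)-1, here returned as j-1. The fuel argument only
-- makes the recursion structural; callers pass fuel ≥ len(array), which the loop never
-- exhausts before j leaves the range. array.getD j 0 is exact: j is always in range here.
def pvInnerA (array : List Int) (minv : Int) : Nat → Nat → List Int → List Int × Nat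
  | 0, j, chunk => (chunk, j - 1)
  | fuel + 1, j, chunk =>
    if j < array.length then
      if array.getD j 0 > minv then pvInnerA array minv fuel (j + 1) (chunk ++ [(j : Int)])
      else (chunk, j)
    else (chunk, j - 1)

-- A's outer while-loop: state is the index i and the accumulated result list; the fuel
-- (≥ len(array) at the call sites) again only makes the recursion structural.
def pvOuterA (array : List Int) (minv : Int) : Nat → Nat → List (List Int) → List (List Int)
  | 0, _, result => result
  | fuel + 1, i, result =>
    if i < array.length - 1 then
      if array.getD i 0 > minv then
        let r := pvInnerA array minv array.length (i + 1) [(i : Int)]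
        pvOuterA array minv fuel r.2 (result ++ [r.1])
      else pvOuterA array minv fuel (i + 1) result
    else result

def get_continous_chunks (array : List Int) : List (List Int) :=
  pvOuterA array ((PySem.List.min? array (fun x => x)).getD 0) array.length 0 []

-- ===== PORT B =====
-- B: one fold over enumerate(array) maintaining (finished runs, current run), flushing
-- the current run when a value does not exceed the minimum, and once at the end.
def get_continous_chunks_alt (array : List Int) : List (List Int) :=
  let min_value := (PySem.List.min? array (fun x => x)).getD 0
  let s := (PySem.List.enumerate array 0).foldl
    (fun (s : List (List Int) × List Int) p =>
      if p.2 > min_value then (s.1, s.2 ++ [p.1])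
      else (if s.2 ≠ [] then s.1 ++ [s.2] else s.1, []))
    ([], [])
  if s.2 ≠ [] then s.1 ++ [s.2] else s.1

-- ===== PRECONDITION & SPEC =====
-- Python's min(array) raises ValueError on the empty list, so A returns only on nonempty input.
def Pre_get_continous_chunks (array : List Int) : Prop := array ≠ []
instance (array : List Int) : Decidable (Pre_get_continous_chunks array) := by
  unfold Pre_get_continous_chunks; infer_instance
def pvWitness_get_continous_chunks : List Int := [1, 0, 2, 2, 0]

-- On arrays whose last element exceeds the minimum while the second-to-last does not
-- (a singleton above-minimum run at the final index), A omits that run because its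
-- while-loop never starts a chunk at the last position, while B returns it; the run is
-- a genuine above-minimum region, so including it is the intended value.
def D_get_continous_chunks (array : List Int) : Prop :=
  2 ≤ array.length ∧
  (∃ x ∈ array, x < (array.getLast?).getD 0) ∧
  (∀ x ∈ array, (array.dropLast.getLast?).getD 0 ≤ x)
instance (array : List Int) : Decidable (D_get_continous_chunks array) := by
  unfold D_get_continous_chunks; infer_instance

def Spec_get_continous_chunks (array : List Int) (out : List (List Int)) : Prop :=
  ¬ D_get_continous_chunks array → out = get_continous_chunks_alt array
instance (array : List Int) (out : List (List Int)) :
    Decidable (Spec_get_continous_chunks array out) := by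
  unfold Spec_get_continous_chunks; infer_instance

def pvDiffWitness_get_continous_chunks : List Int := [1, 0, 2]
def pvDiffWitnessOut_get_continous_chunks : (List (List Int)) × (List (List Int)) :=
  ([[0]], [[0], [2]])

-- ===== CLAIM (what is proved, stated in full; the proofs are below) =====
def Claim_unchanged_get_continous_chunks : Prop :=
  ∀ (array : List Int), Dom_get_continous_chunks array → Pre_get_continous_chunks array →
    Spec_get_continous_chunks array (get_continous_chunks array)
def Claim_changed_get_continous_chunks : Prop :=
  Dom_get_continous_chunks (pvDiffWitness_get_continous_chunks) ∧
  Pre_get_continous_chunks (pvDiffWitness_get_continous_chunks) ∧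
  D_get_continous_chunks (pvDiffWitness_get_continous_chunks) ∧
  get_continous_chunks (pvDiffWitness_get_continous_chunks) =
    pvDiffWitnessOut_get_continous_chunks.1 ∧
  get_continous_chunks_alt (pvDiffWitness_get_continous_chunks) =
    pvDiffWitnessOut_get_continous_chunks.2 ∧
  pvDiffWitnessOut_get_continous_chunks.1 ≠ pvDiffWitnessOut_get_continous_chunks.2
def Claim_exact_get_continous_chunks : Prop :=
  ∀ (array : List Int), Dom_get_continous_chunks array → Pre_get_continous_chunks array →
    D_get_continous_chunks array →
    get_continous_chunks array ≠ get_continous_chunks_alt array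

-- ===== LEMMAS AND PROOFS =====

-- proof-side view of B's single pass, as fuelled index recursion over the suffix from j
def pvF (array : List Int) (minv : Int) : Nat → Nat → List (List Int) → List Int → List (List Int)
  | 0, _, runs, cur => if cur ≠ [] then runs ++ [cur] else runs
  | fuel + 1, j, runs, cur =>
    if j < array.length then
      if array.getD j 0 > minv then pvF array minv fuel (j + 1) runs (cur ++ [(j : Int)])
      else pvF array minv fuel (j + 1) (if cur ≠ [] then runs ++ [cur] else runs) []
    else (if cur ≠ [] then runs ++ [cur] else runs)

-- past the end of the array, pvF flushes whatever the fuel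
theorem pvF_exhaust (array : List Int) (minv : Int) (fuel j : Nat)
    (runs : List (List Int)) (cur : List Int) (h : array.length ≤ j) :
    pvF array minv fuel j runs cur = if cur ≠ [] then runs ++ [cur] else runs := by
  cases fuel with
  | zero => rfl
  | succ f => simp only [pvF]; rw [if_neg (by omega)]

-- with sufficient fuel, the fuel does not matter
theorem pvF_fuel (array : List Int) (minv : Int) :
    ∀ (f1 f2 j : Nat), array.length - j ≤ f1 → array.length - j ≤ f2 →
      ∀ (runs : List (List Int)) (cur : List Int),
        pvF array minv f1 j runs cur = pvF array minv f2 j runs cur := by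
  intro f1
  induction f1 with
  | zero =>
      intro f2 j h1 h2 runs cur
      rw [pvF_exhaust array minv 0 j runs cur (by omega),
          pvF_exhaust array minv f2 j runs cur (by omega)]
  | succ f ih =>
      intro f2 j h1 h2 runs cur
      by_cases h : j < array.length
      · cases f2 with
        | zero => omega
        | succ g =>
            simp only [pvF]
            rw [if_pos h, if_pos h]
            by_cases hgt : array.getD j 0 > minv
            · rw [if_pos hgt, if_pos hgt]
              exact ih g (j + 1) (by omega) (by omega) runs (cur ++ [(j : Int)])
            · rw [if_neg hgt, if_neg hgt]
              exact ih g (j + 1) (by omega) (by omega) _ []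
      · rw [pvF_exhaust array minv (f + 1) j runs cur (by omega),
            pvF_exhaust array minv f2 j runs cur (by omega)]

-- one sufficient-fuel unfolding step of pvF, keeping the fuel
theorem pvF_unfold (array : List Int) (minv : Int) (fuel j : Nat)
    (hf : array.length - j ≤ fuel) (h : j < array.length)
    (runs : List (List Int)) (cur : List Int) :
    pvF array minv fuel j runs cur =
      if array.getD j 0 > minv then pvF array minv fuel (j + 1) runs (cur ++ [(j : Int)])
      else pvF array minv fuel (j + 1) (if cur ≠ [] then runs ++ [cur] else runs) [] := by
  cases fuel with
  | zero => omega
  | succ f =>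
      simp only [pvF]
      rw [if_pos h]
      by_cases hgt : array.getD j 0 > minv
      · rw [if_pos hgt, if_pos hgt]
        exact pvF_fuel array minv f (f + 1) (j + 1) (by omega) (by omega) _ _
      · rw [if_neg hgt, if_neg hgt]
        exact pvF_fuel array minv f (f + 1) (j + 1) (by omega) (by omega) _ _

-- B's foldl over enumerate, started at suffix j, equals pvF
theorem pvF_eq_fold (array : List Int) (minv : Int) :
    ∀ (fuel j : Nat), array.length - j ≤ fuel → ∀ (runs : List (List Int)) (cur : List Int),
      (let s := (PySem.List.enumerate (array.drop j) (j : Int)).foldl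
        (fun (s : List (List Int) × List Int) p =>
          if p.2 > minv then (s.1, s.2 ++ [p.1])
          else (if s.2 ≠ [] then s.1 ++ [s.2] else s.1, []))
        (runs, cur);
      if s.2 ≠ [] then s.1 ++ [s.2] else s.1) = pvF array minv fuel j runs cur := by
  intro fuel
  induction fuel with
  | zero =>
      intro j hj runs cur
      have hd : array.drop j = [] := List.drop_eq_nil_of_le (by omega)
      simp only [pvF]
      simp [hd]
  | succ f ih =>
      intro j hj runs cur
      by_cases h : j < array.length
      · simp only [pvF]
        rw [if_pos h, List.drop_eq_getElem_cons h]
        rw [PySem.List.enumerate_cons, List.foldl_cons]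
        have hg : array[j] = array.getD j 0 := by
          simp [List.getD, List.getElem?_eq_getElem h]
        have hcast : ((j : Int) + 1) = ((j + 1 : Nat) : Int) := by push_cast; ring
        by_cases hgt : array.getD j 0 > minv
        · rw [if_pos hgt]
          simp only [hg, hgt, if_true, hcast]
          exact ih (j + 1) (by omega) runs (cur ++ [(j : Int)])
        · rw [if_neg hgt]
          simp only [hg, hgt, if_false, hcast]
          exact ih (j + 1) (by omega) _ []
      · rw [pvF_exhaust array minv (f + 1) j runs cur (by omega)]
        have hd : array.drop j = [] := List.drop_eq_nil_of_le (by omega)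
        simp [hd]

-- accumulated runs are only ever appended to
theorem pvF_prefix (array : List Int) (minv : Int) :
    ∀ (fuel j : Nat) (runs : List (List Int)) (cur : List Int),
      pvF array minv fuel j runs cur = runs ++ pvF array minv fuel j [] cur := by
  intro fuel
  induction fuel with
  | zero =>
      intro j runs cur
      simp only [pvF]
      split <;> simp
  | succ f ih =>
      intro j runs cur
      simp only [pvF]
      by_cases h : j < array.length
      · rw [if_pos h, if_pos h]
        by_cases hgt : array.getD j 0 > minv
        · rw [if_pos hgt, if_pos hgt]
          exact ih (j + 1) runs (cur ++ [(j : Int)])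
        · rw [if_neg hgt, if_neg hgt]
          rw [ih (j + 1) (if cur ≠ [] then runs ++ [cur] else runs) [],
              ih (j + 1) (if cur ≠ [] then [] ++ [cur] else []) []]
          split <;> simp
      · rw [if_neg h, if_neg h]
        split <;> simp

-- the chunk produced by the inner scan extends its argument
theorem pvInnerA_prefix (array : List Int) (minv : Int) :
    ∀ (fuel j : Nat) (chunk : List Int),
      ∃ s, (pvInnerA array minv fuel j chunk).1 = chunk ++ s := by
  intro fuel
  induction fuel with
  | zero => intro j chunk; exact ⟨[], by simp [pvInnerA]⟩
  | succ f ih =>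
      intro j chunk
      simp only [pvInnerA]
      by_cases h : j < array.length
      · rw [if_pos h]
        by_cases hgt : array.getD j 0 > minv
        · rw [if_pos hgt]
          obtain ⟨s, hs⟩ := ih (j + 1) (chunk ++ [(j : Int)])
          exact ⟨(j : Int) :: s, by simpa using hs⟩
        · rw [if_neg hgt]; exact ⟨[], by simp⟩
      · rw [if_neg h]; exact ⟨[], by simp⟩

-- the index returned by the inner scan is at least its start minus one
theorem pvInnerA_ge1 (array : List Int) (minv : Int) :
    ∀ (fuel j : Nat) (chunk : List Int), j ≤ (pvInnerA array minv fuel j chunk).2 + 1 := by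
  intro fuel
  induction fuel with
  | zero => intro j chunk; show j ≤ j - 1 + 1; omega
  | succ f ih =>
      intro j chunk
      simp only [pvInnerA]
      by_cases h : j < array.length
      · rw [if_pos h]
        by_cases hgt : array.getD j 0 > minv
        · rw [if_pos hgt]
          have := ih (j + 1) (chunk ++ [(j : Int)]); omega
        · rw [if_neg hgt]; exact Nat.le_succ j
      · rw [if_neg h]; show j ≤ j - 1 + 1; omega

-- with sufficient fuel and a start in range, the returned index is at least the start
theorem pvInnerA_ge2 (array : List Int) (minv : Int) (fuel j : Nat) (chunk : List Int)
    (hf : array.length - j ≤ fuel) (h : j < array.length) :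
    j ≤ (pvInnerA array minv fuel j chunk).2 := by
  cases fuel with
  | zero => omega
  | succ f =>
      simp only [pvInnerA]
      rw [if_pos h]
      split
      · have := pvInnerA_ge1 array minv f (j + 1) (chunk ++ [(j : Int)]); omega
      · exact Nat.le_refl j

-- the index returned by the inner scan is at most len-1
theorem pvInnerA_le (array : List Int) (minv : Int) :
    ∀ (fuel j : Nat) (chunk : List Int), array.length - j ≤ fuel → j ≤ array.length →
      (pvInnerA array minv fuel j chunk).2 ≤ array.length - 1 := by
  intro fuel
  induction fuel with
  | zero => intro j chunk h1 h2; show j - 1 ≤ array.length - 1; omega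
  | succ f ih =>
      intro j chunk h1 h2
      simp only [pvInnerA]
      by_cases h : j < array.length
      · rw [if_pos h]
        by_cases hgt : array.getD j 0 > minv
        · rw [if_pos hgt]; exact ih (j + 1) (chunk ++ [(j : Int)]) (by omega) (by omega)
        · rw [if_neg hgt]; show j ≤ array.length - 1; omega
      · rw [if_neg h]; show j - 1 ≤ array.length - 1; omega

-- the index returned is len-1, or the value there does not exceed the minimum
theorem pvInnerA_break (array : List Int) (minv : Int) :
    ∀ (fuel j : Nat) (chunk : List Int), array.length - j ≤ fuel → j ≤ array.length →
      (pvInnerA array minv fuel j chunk).2 = array.length - 1 ∨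
      ((pvInnerA array minv fuel j chunk).2 < array.length ∧
        ¬ array.getD (pvInnerA array minv fuel j chunk).2 0 > minv) := by
  intro fuel
  induction fuel with
  | zero =>
      intro j chunk h1 h2
      left; show j - 1 = array.length - 1; omega
  | succ f ih =>
      intro j chunk h1 h2
      simp only [pvInnerA]
      by_cases h : j < array.length
      · rw [if_pos h]
        by_cases hgt : array.getD j 0 > minv
        · rw [if_pos hgt]; exact ih (j + 1) (chunk ++ [(j : Int)]) (by omega) (by omega)
        · rw [if_neg hgt]; exact Or.inr ⟨h, hgt⟩
      · rw [if_neg h]; left; show j - 1 = array.length - 1; omega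

-- one maximal run: B's pass from j with nonempty current chunk flushes exactly A's chunk
theorem pvF_inner (array : List Int) (minv : Int) :
    ∀ (fuel j : Nat), array.length - j ≤ fuel → j ≤ array.length →
      ∀ (runs : List (List Int)) (cur : List Int), cur ≠ [] →
        pvF array minv fuel j runs cur =
          pvF array minv fuel ((pvInnerA array minv fuel j cur).2 + 1)
            (runs ++ [(pvInnerA array minv fuel j cur).1]) [] := by
  intro fuel
  induction fuel with
  | zero =>
      intro j hj hle runs cur hcur
      have hstep : pvF array minv 0 j runs cur = runs ++ [cur] := by
        simp only [pvF]; rw [if_pos hcur]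
      have hI : pvInnerA array minv 0 j cur = (cur, j - 1) := rfl
      rw [hstep, hI, pvF_exhaust array minv 0 (j - 1 + 1) _ [] (by omega)]
      simp
  | succ f ih =>
      intro j hj hle runs cur hcur
      by_cases h : j < array.length
      · by_cases hgt : array.getD j 0 > minv
        · have hstep : pvF array minv (f + 1) j runs cur =
              pvF array minv f (j + 1) runs (cur ++ [(j : Int)]) := by
            simp only [pvF]; rw [if_pos h, if_pos hgt]
          have hI : pvInnerA array minv (f + 1) j cur =
              pvInnerA array minv f (j + 1) (cur ++ [(j : Int)]) := by
            simp only [pvInnerA]; rw [if_pos h, if_pos hgt]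
          rw [hstep, hI, ih (j + 1) (by omega) (by omega) runs (cur ++ [(j : Int)]) (by simp)]
          have hge := pvInnerA_ge1 array minv f (j + 1) (cur ++ [(j : Int)])
          exact pvF_fuel array minv f (f + 1) _ (by omega) (by omega) _ _
        · have hstep : pvF array minv (f + 1) j runs cur =
              pvF array minv f (j + 1) (runs ++ [cur]) [] := by
            simp only [pvF]; rw [if_pos h, if_neg hgt, if_pos hcur]
          have hI : pvInnerA array minv (f + 1) j cur = (cur, j) := by
            simp only [pvInnerA]; rw [if_pos h, if_neg hgt]
          rw [hstep, hI]
          exact pvF_fuel array minv f (f + 1) (j + 1) (by omega) (by omega) _ _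
      · have hstep : pvF array minv (f + 1) j runs cur = runs ++ [cur] := by
          simp only [pvF]; rw [if_neg h, if_pos hcur]
        have hI : pvInnerA array minv (f + 1) j cur = (cur, j - 1) := by
          simp only [pvInnerA]; rw [if_neg h]
        rw [hstep, hI, pvF_exhaust array minv (f + 1) (j - 1 + 1) _ [] (by omega)]
        simp

-- the filtered tail of B's pass is empty once the outer loop has stopped (i ≥ len-1)
theorem pvBase (array : List Int) (minv : Int) (i : Nat) (h : ¬ i < array.length - 1) :
    (pvF array minv array.length i [] []).filter
      (fun r => r ≠ [(array.length : Int) - 1]) = [] := by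
  by_cases hn : i < array.length
  · rw [pvF_unfold array minv array.length i (by omega) hn]
    by_cases hgt : array.getD i 0 > minv
    · rw [if_pos hgt]
      rw [pvF_exhaust array minv array.length (i + 1) _ _ (by omega)]
      have hii : ((i : Int)) = (array.length : Int) - 1 := by omega
      simp [hii]
    · rw [if_neg hgt]
      rw [pvF_exhaust array minv array.length (i + 1) _ _ (by omega)]
      simp
  · rw [pvF_exhaust array minv array.length i _ _ (by omega)]
    simp

-- main invariant: A's outer loop from i equals the filtered tail of B's pass from i
theorem pvMain (array : List Int) (minv : Int) :
    ∀ (fuel i : Nat), array.length - 1 - i ≤ fuel → i ≤ array.length - 1 →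
      ∀ (runs : List (List Int)),
        pvOuterA array minv fuel i runs =
          runs ++ (pvF array minv array.length i [] []).filter
            (fun r => r ≠ [(array.length : Int) - 1]) := by
  intro fuel
  induction fuel with
  | zero =>
      intro i hf hi runs
      rw [pvBase array minv i (by omega)]
      simp [pvOuterA]
  | succ f ih =>
      intro i hf hi runs
      by_cases h : i < array.length - 1
      · simp only [pvOuterA]
        rw [if_pos h]
        by_cases hgt : array.getD i 0 > minv
        · rw [if_pos hgt]
          have hn : i < array.length := by omega
          have hi1 : i + 1 ≤ array.length := by omega
          have hge : i + 1 ≤ (pvInnerA array minv array.length (i + 1) [(i : Int)]).2 :=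
            pvInnerA_ge2 array minv array.length (i + 1) _ (by omega) (by omega)
          have hle2 : (pvInnerA array minv array.length (i + 1) [(i : Int)]).2 ≤
              array.length - 1 :=
            pvInnerA_le array minv array.length (i + 1) _ (by omega) hi1
          -- B side: unfold one step, then absorb one maximal run
          have hB : pvF array minv array.length i [] [] =
              [(pvInnerA array minv array.length (i + 1) [(i : Int)]).1] ++
                pvF array minv array.length
                  ((pvInnerA array minv array.length (i + 1) [(i : Int)]).2 + 1) [] [] := by
            rw [pvF_unfold array minv array.length i (by omega) hn, if_pos hgt]
            simp only [List.nil_append]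
            rw [pvF_inner array minv array.length (i + 1) (by omega) hi1 [] [(i : Int)]
                (by simp)]
            rw [pvF_prefix]
            simp
          rw [hB]
          -- the chunk survives the filter: it starts at index i < len-1
          obtain ⟨s, hs⟩ := pvInnerA_prefix array minv array.length (i + 1) [(i : Int)]
          have hkeep : ¬ (pvInnerA array minv array.length (i + 1) [(i : Int)]).1 =
              [(array.length : Int) - 1] := by
            rw [hs]
            intro hcontra
            have h1 : ((i : Int)) :: s = [(array.length : Int) - 1] := by simpa using hcontra
            have h2 : ((i : Int)) = (array.length : Int) - 1 ∧ s = ([] : List Int) := by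
              simpa using h1
            have := h2.1
            omega
          rcases pvInnerA_break array minv array.length (i + 1) [(i : Int)] (by omega) hi1
            with hend | ⟨hlt, hnogt⟩
          · -- run reaches the end of the array: the outer loop stops at len-1
            cases f with
            | zero =>
                simp only [pvOuterA]
                rw [pvF_exhaust array minv array.length _ _ _ (by omega)]
                simp [hkeep]
            | succ g =>
                simp only [pvOuterA]
                rw [if_neg (show ¬ (pvInnerA array minv array.length (i + 1)
                  [(i : Int)]).2 < array.length - 1 by omega)]
                rw [pvF_exhaust array minv array.length _ _ _ (by omega)]
                simp [hkeep]
          · -- run broke at an index with value ≤ min: the outer loop resumes there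
            have hF : pvF array minv array.length
                (pvInnerA array minv array.length (i + 1) [(i : Int)]).2 [] [] =
                pvF array minv array.length
                  ((pvInnerA array minv array.length (i + 1) [(i : Int)]).2 + 1) [] [] := by
              rw [pvF_unfold array minv array.length _ (by omega) hlt, if_neg hnogt]
              simp
            rw [ih (pvInnerA array minv array.length (i + 1) [(i : Int)]).2 (by omega)
                (by omega) (runs ++ [(pvInnerA array minv array.length (i + 1)
                  [(i : Int)]).1]), hF]
            simp [hkeep]
        · rw [if_neg hgt]
          have hn : i < array.length := by omega
          have hF : pvF array minv array.length i [] [] =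
              pvF array minv array.length (i + 1) [] [] := by
            rw [pvF_unfold array minv array.length i (by omega) hn, if_neg hgt]
            simp
          rw [ih (i + 1) (by omega) (by omega) runs, hF]
      · simp only [pvOuterA]
        rw [if_neg h, pvBase array minv i h]
        simp

-- D_ (stated on the raw input: last element beats some element, second-to-last beats
-- none) is equivalent, on nonempty arrays, to the index/minimum form the proofs use
theorem pvD_char (array : List Int) (hne : array ≠ []) :
    D_get_continous_chunks array ↔
      (2 ≤ array.length ∧
        array.getD (array.length - 1) 0 > (PySem.List.min? array (fun x => x)).getD 0 ∧
        ¬ array.getD (array.length - 2) 0 >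
          (PySem.List.min? array (fun x => x)).getD 0) := by
  rcases hmin : PySem.List.min? array (fun x => x) with _ | v
  · rw [PySem.List.min?_eq_none_iff] at hmin
    exact absurd hmin hne
  · have hvmem : v ∈ array := PySem.List.min?_mem hmin
    have hvmin : ∀ y ∈ array, v ≤ y := by
      have := PySem.List.min?_isMin hmin
      simpa using this
    unfold D_get_continous_chunks
    simp only [Option.getD_some]
    have hlastE : (array.getLast?).getD 0 = array.getD (array.length - 1) 0 := by
      rw [List.getLast?_eq_getElem?, List.getD_eq_getElem?_getD]
    constructor
    · rintro ⟨hL, ⟨x, hx, hxlt⟩, hall⟩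
      have hprevE : (array.dropLast.getLast?).getD 0 = array.getD (array.length - 2) 0 := by
        rw [List.getLast?_eq_getElem?, List.length_dropLast, List.getElem?_dropLast,
            List.getD_eq_getElem?_getD, if_pos (by omega),
            show array.length - 1 - 1 = array.length - 2 by omega]
      refine ⟨hL, ?_, ?_⟩
      · rw [← hlastE]
        exact lt_of_le_of_lt (hvmin x hx) hxlt
      · rw [← hprevE]
        simp only [not_lt]
        exact hall v hvmem
    · rintro ⟨hL, hlast, hprev⟩
      have hprevE : (array.dropLast.getLast?).getD 0 = array.getD (array.length - 2) 0 := by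
        rw [List.getLast?_eq_getElem?, List.length_dropLast, List.getElem?_dropLast,
            List.getD_eq_getElem?_getD, if_pos (by omega),
            show array.length - 1 - 1 = array.length - 2 by omega]
      refine ⟨hL, ⟨v, hvmem, ?_⟩, ?_⟩
      · rw [hlastE]
        exact hlast
      · intro x hx
        rw [hprevE]
        simp only [not_lt] at hprev
        exact le_trans hprev (hvmin x hx)

-- outside the difference region, B's pass never produces the singleton run [len-1]
theorem pvF_no_singleton (array : List Int) (minv : Int)
    (hC : ¬ (array.getD (array.length - 1) 0 > minv ∧
      (array.length ≤ 1 ∨ ¬ array.getD (array.length - 2) 0 > minv))) :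
    ∀ (fuel j : Nat), array.length - j ≤ fuel → j ≤ array.length →
      ∀ (runs : List (List Int)) (cur : List Int),
        (∀ r ∈ runs, r ≠ [(array.length : Int) - 1]) →
        cur ≠ [(array.length : Int) - 1] →
        (cur = [] → (j = 0 ∨ ¬ array.getD (j - 1) 0 > minv)) →
        ∀ r ∈ pvF array minv fuel j runs cur, r ≠ [(array.length : Int) - 1] := by
  intro fuel
  induction fuel with
  | zero =>
      intro j hf hj runs cur hruns hcur _
      simp only [pvF]
      split
      · intro r hr
        rcases List.mem_append.mp hr with h1 | h2
        · exact hruns r h1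
        · rw [List.mem_singleton] at h2
          rw [h2]; exact hcur
      · exact hruns
  | succ f ih =>
      intro j hf hj runs cur hruns hcur hcur0
      by_cases h : j < array.length
      · rw [pvF_unfold array minv (f + 1) j (by omega) h]
        by_cases hgt : array.getD j 0 > minv
        · rw [if_pos hgt,
              pvF_fuel array minv (f + 1) f (j + 1) (by omega) (by omega)]
          apply ih (j + 1) (by omega) (by omega) runs (cur ++ [(j : Int)]) hruns
          · -- the new current run is not the singleton [len-1]
            cases cur with
            | nil =>
                simp only [List.nil_append]
                intro hc
                have hji : (j : Int) = (array.length : Int) - 1 := by simpa using hc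
                have hjv : j = array.length - 1 := by omega
                rcases hcur0 rfl with h0 | hprev
                · exact hC ⟨hjv ▸ hgt, Or.inl (by omega)⟩
                · have he : j - 1 = array.length - 2 := by omega
                  exact hC ⟨hjv ▸ hgt, Or.inr (he ▸ hprev)⟩
            | cons a t =>
                intro hc
                have := congrArg List.length hc
                simp at this
          · intro hc
            simp at hc
        · rw [if_neg hgt,
              pvF_fuel array minv (f + 1) f (j + 1) (by omega) (by omega)]
          apply ih (j + 1) (by omega) (by omega) _ []
          · intro r hr
            by_cases hc : cur ≠ []
            · rw [if_pos hc] at hr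
              rcases List.mem_append.mp hr with h1 | h2
              · exact hruns r h1
              · rw [List.mem_singleton] at h2
                rw [h2]; exact hcur
            · rw [if_neg hc] at hr
              exact hruns r hr
          · simp
          · intro _
            right
            simpa using hgt
      · rw [pvF_exhaust array minv (f + 1) j runs cur (by omega)]
        intro r hr
        split at hr
        · rcases List.mem_append.mp hr with h1 | h2
          · exact hruns r h1
          · rw [List.mem_singleton] at h2
            rw [h2]; exact hcur
        · exact hruns r hr

-- inside the difference region, B's pass from a start left of len-2 ends with [len-1]
theorem pvF_tail (array : List Int) (minv : Int)
    (hL : 2 ≤ array.length)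
    (hlast : array.getD (array.length - 1) 0 > minv)
    (hprev : ¬ array.getD (array.length - 2) 0 > minv) :
    ∀ (fuel j : Nat), array.length - j ≤ fuel → j ≤ array.length - 2 →
      ∀ (runs : List (List Int)) (cur : List Int),
        ∃ rs, pvF array minv fuel j runs cur = rs ++ [[(array.length : Int) - 1]] := by
  intro fuel
  induction fuel with
  | zero => intro j hf hj runs cur; omega
  | succ f ih =>
      intro j hf hj runs cur
      by_cases hend : j = array.length - 2
      · -- value at len-2 does not exceed min: flush, then the last step builds [len-1]
        have hn : j < array.length := by omega
        rw [pvF_unfold array minv (f + 1) j (by omega) hn, if_neg (hend ▸ hprev)]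
        have hn1 : j + 1 < array.length := by omega
        rw [pvF_unfold array minv (f + 1) (j + 1) (by omega) hn1]
        have hj1 : j + 1 = array.length - 1 := by omega
        rw [if_pos (hj1 ▸ hlast)]
        rw [pvF_exhaust array minv (f + 1) (j + 1 + 1) _ _ (by omega)]
        refine ⟨if cur ≠ [] then runs ++ [cur] else runs, ?_⟩
        have hcast : ((j + 1 : Nat) : Int) = (array.length : Int) - 1 := by
          push_cast; omega
        simp [hcast]
      · have hn : j < array.length := by omega
        rw [pvF_unfold array minv (f + 1) j (by omega) hn]
        by_cases hgt : array.getD j 0 > minv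
        · rw [if_pos hgt]
          have hrec := ih (j + 1) (by omega) (by omega) runs (cur ++ [(j : Int)])
          obtain ⟨rs, hrs⟩ := hrec
          refine ⟨rs, ?_⟩
          rw [← hrs]
          exact pvF_fuel array minv (f + 1) f (j + 1) (by omega) (by omega) _ _
        · rw [if_neg hgt]
          have hrec := ih (j + 1) (by omega) (by omega)
            (if cur ≠ [] then runs ++ [cur] else runs) []
          obtain ⟨rs, hrs⟩ := hrec
          refine ⟨rs, ?_⟩
          rw [← hrs]
          exact pvF_fuel array minv (f + 1) f (j + 1) (by omega) (by omega) _ _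

-- ===== VERDICT (by name: the statement is the Claim_ definition above) =====
theorem get_continous_chunks_spec : Claim_unchanged_get_continous_chunks := by
  intro array _hdom hpre hnD
  unfold get_continous_chunks get_continous_chunks_alt
  set minv := (PySem.List.min? array (fun x => x)).getD 0 with hminv
  have h1 := pvMain array minv array.length 0 (by omega) (by omega) []
  have h2 := pvF_eq_fold array minv array.length 0 (by omega) [] []
  simp only [List.drop_zero, Nat.cast_zero] at h2
  rw [h1]
  simp only [List.nil_append]
  -- the filter drops nothing outside D_
  have hone : ∀ (a : Int), array = [a] → ¬ array.getD (array.length - 1) 0 > minv := by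
    intro a ha
    have hm : minv = a := by
      rw [hminv, ha, PySem.List.min?_id_cons]
      rfl
    rw [ha, hm]
    simp
  have hC : ¬ (array.getD (array.length - 1) 0 > minv ∧
      (array.length ≤ 1 ∨ ¬ array.getD (array.length - 2) 0 > minv)) := by
    rintro ⟨hlast, hor⟩
    cases array with
    | nil => exact hpre rfl
    | cons a t =>
        cases t with
        | nil => exact hone a rfl hlast
        | cons b u =>
            rcases hor with hle | hprev
            · simp at hle
            · exact hnD ((pvD_char (a :: b :: u) (by simp)).mpr ⟨by simp, hlast, hprev⟩)
  have hall := pvF_no_singleton array minv hC array.length 0 (by omega) (by omega) [] []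
    (by simp) (by simp) (by intro _; left; rfl)
  have hfix : (pvF array minv array.length 0 [] []).filter
      (fun r => r ≠ [(array.length : Int) - 1]) = pvF array minv array.length 0 [] [] := by
    apply List.filter_eq_self.mpr
    intro a ha
    simpa using hall a ha
  rw [hfix, ← h2]

theorem get_continous_chunks_changed : Claim_changed_get_continous_chunks := by
  unfold Claim_changed_get_continous_chunks; decide

theorem get_continous_chunks_tight : Claim_exact_get_continous_chunks := by
  intro array _hdom _hpre hD
  obtain ⟨hL, hlast, hprev⟩ := (pvD_char array _hpre).mp hD
  unfold get_continous_chunks get_continous_chunks_alt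
  set minv := (PySem.List.min? array (fun x => x)).getD 0 with hminv
  have h1 := pvMain array minv array.length 0 (by omega) (by omega) []
  have h2 := pvF_eq_fold array minv array.length 0 (by omega) [] []
  simp only [List.drop_zero, Nat.cast_zero] at h2
  rw [h1]
  simp only [List.nil_append]
  obtain ⟨rs, hrs⟩ := pvF_tail array minv hL hlast hprev array.length 0 (by omega)
    (by omega) [] []
  rw [hrs]
  intro hcontra0
  have hcontra : (rs ++ [[(array.length : Int) - 1]]).filter
      (fun r => r ≠ [(array.length : Int) - 1]) = rs ++ [[(array.length : Int) - 1]] :=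
    hcontra0.trans (h2.trans hrs)
  have hlen := congrArg List.length hcontra
  rw [List.filter_append] at hlen
  simp at hlen
  have hle := List.length_filter_le
    (fun r => !decide (r = [(array.length : Int) - 1])) rs
  omega
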